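-- pv_equiv track=rewrite | github.com/galaxyproject/tools-iuc | tools/cwpair2/cwpair2_util.py | get_window
-- ===== SOURCE A (Python) =====
-- import bisect
--
-- def make_keys(crick):
--     return [(data[1] + data[2]) // 2 for data in crick]
--
-- def get_window(crick, peak, up_distance, down_distance, keys=None):
--     """
--     Returns a window of all crick peaks within a distance of a watson peak.
--     crick strand MUST be sorted by distance
--     """
--     strand, start, end, value = peak
--     midpoint = (start + end) // 2
--     lower = midpoint - up_distance
--     upper = midpoint + down_distance
--     keys = keys or make_keys(crick)
--     start_index = bisect.bisect_left(keys, lower)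
--     end_index = bisect.bisect_right(keys, upper)
--     return [cpeak for cpeak in crick[start_index:end_index]]
-- ===== SOURCE B (Python) =====
-- def get_window(crick, peak, up_distance, down_distance, keys=None):
--     """
--     Returns a window of all crick peaks within a distance of a watson peak.
--     crick strand MUST be sorted by distance
--     """
--     strand, start, end, value = peak
--     midpoint = (start + end) // 2
--     lower = midpoint - up_distance
--     upper = midpoint + down_distance
--     keys = keys or [(data[1] + data[2]) // 2 for data in crick]
--     return [cpeak for k, cpeak in zip(keys, crick) if lower <= k <= upper]
-- ===== Notes on version B (the rewrite author's own statement) =====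
-- stated objective: simpler
-- what changed: The two bisect binary searches plus positional slice are replaced by a single linear pass that zips the keys with the crick peaks and keeps those whose key lies in the inclusive [lower, upper] range; on sorted keys (the function's documented precondition) the selected run is the same contiguous slice. Pre_ excludes inputs whose effective key list is unsorted (the docstring requires crick sorted by distance), on which bisect's binary-search slice boundaries are an artifact a linear scan cannot reproduce.
-- outside the precondition, e.g. on get_window([('', 0, 0, 0)], ('', 0, 0, 0), 1, 1, [2, 0]): A returns [('', 0, 0, 0)], B returns []
import Mathlib
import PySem

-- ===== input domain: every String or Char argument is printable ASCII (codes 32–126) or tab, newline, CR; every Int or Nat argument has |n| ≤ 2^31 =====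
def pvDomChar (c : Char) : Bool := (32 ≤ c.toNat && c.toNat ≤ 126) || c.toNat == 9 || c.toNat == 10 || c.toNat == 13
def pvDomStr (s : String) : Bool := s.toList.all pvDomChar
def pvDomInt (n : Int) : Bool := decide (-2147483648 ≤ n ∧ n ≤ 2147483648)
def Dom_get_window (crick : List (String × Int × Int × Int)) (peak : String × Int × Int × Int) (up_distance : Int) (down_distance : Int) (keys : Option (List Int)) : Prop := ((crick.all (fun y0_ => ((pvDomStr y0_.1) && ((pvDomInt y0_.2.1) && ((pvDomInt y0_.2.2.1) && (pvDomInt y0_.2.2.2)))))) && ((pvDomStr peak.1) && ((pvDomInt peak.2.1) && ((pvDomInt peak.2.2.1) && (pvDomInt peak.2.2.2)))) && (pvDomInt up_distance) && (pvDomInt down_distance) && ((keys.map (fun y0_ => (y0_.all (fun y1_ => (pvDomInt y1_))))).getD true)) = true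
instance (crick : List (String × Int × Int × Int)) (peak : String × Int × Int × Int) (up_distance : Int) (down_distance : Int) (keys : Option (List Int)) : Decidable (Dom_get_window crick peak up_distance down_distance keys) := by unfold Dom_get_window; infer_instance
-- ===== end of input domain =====

-- B replaces A's two bisect binary searches + slice by one linear zip-and-filter pass (simpler);
-- on a sorted key list (the function's documented precondition, stated in Pre_) the results coincide.

-- ===== PORT A =====
def make_keys (crick : List (String × Int × Int × Int)) : List Int :=
  crick.map (fun data => PySem.Int.floordiv (data.2.1 + data.2.2.1) 2)

def get_window (crick : List (String × Int × Int × Int)) (peak : String × Int × Int × Int) (up_distance : Int) (down_distance : Int) (keys : Option (List Int)) : List (String × Int × Int × Int) :=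
  let start := peak.2.1
  let end_ := peak.2.2.1
  let midpoint := PySem.Int.floordiv (start + end_) 2
  let lower := midpoint - up_distance
  let upper := midpoint + down_distance
  -- `keys = keys or make_keys(crick)`: None and the empty list are falsy
  let ks0 := keys.getD []
  let keys' := if ks0.isEmpty then make_keys crick else ks0
  let start_index := PySem.List.bisectLeft keys' lower
  let end_index := PySem.List.bisectRight keys' upper
  PySem.List.slice crick (some ((start_index : Nat) : Int)) (some ((end_index : Nat) : Int))

-- ===== PORT B =====
def get_window_alt (crick : List (String × Int × Int × Int)) (peak : String × Int × Int × Int) (up_distance : Int) (down_distance : Int) (keys : Option (List Int)) : List (String × Int × Int × Int) :=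
  let midpoint := PySem.Int.floordiv (peak.2.1 + peak.2.2.1) 2
  let lower := midpoint - up_distance
  let upper := midpoint + down_distance
  let given := keys.getD []
  let keys' := if given = ([] : List Int) then
      crick.map (fun (data : String × Int × Int × Int) => PySem.Int.floordiv (data.2.1 + data.2.2.1) 2)
    else given
  ((keys'.zip crick).filter (fun (kc : Int × (String × Int × Int × Int)) => decide (lower ≤ kc.1) && decide (kc.1 ≤ upper))).map Prod.snd

-- ===== PRECONDITION & SPEC =====
-- the effective key list `keys or midpoints(crick)` that both programs consult
def pvEffKeys (crick : List (String × Int × Int × Int)) (keys : Option (List Int)) : List Int :=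
  if (keys.getD []).length = 0 then
    crick.map (fun (data : String × Int × Int × Int) => PySem.Int.floordiv (data.2.1 + data.2.2.1) 2)
  else keys.getD []

-- Pre_ excludes inputs whose effective key list is unsorted (the docstring requires crick sorted
-- by distance), on which bisect's binary-search slice boundaries are an implementation artifact.
def Pre_get_window (crick : List (String × Int × Int × Int)) (peak : String × Int × Int × Int) (up_distance : Int) (down_distance : Int) (keys : Option (List Int)) : Prop :=
  List.Pairwise (fun a b => a ≤ b) (pvEffKeys crick keys)
instance (crick : List (String × Int × Int × Int)) (peak : String × Int × Int × Int) (up_distance : Int) (down_distance : Int) (keys : Option (List Int)) : Decidable (Pre_get_window crick peak up_distance down_distance keys) := by unfold Pre_get_window; infer_instance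

def pvWitness_get_window : (List (String × Int × Int × Int)) × (String × Int × Int × Int) × Int × Int × Option (List Int) :=
  ([("c", 0, 2, 5), ("c", 4, 6, 7)], ("w", 2, 4, 1), 10, 10, none)

def Spec_get_window (crick : List (String × Int × Int × Int)) (peak : String × Int × Int × Int) (up_distance : Int) (down_distance : Int) (keys : Option (List Int)) (out : List (String × Int × Int × Int)) : Prop := out = get_window_alt crick peak up_distance down_distance keys
instance (crick : List (String × Int × Int × Int)) (peak : String × Int × Int × Int) (up_distance : Int) (down_distance : Int) (keys : Option (List Int)) (out : List (String × Int × Int × Int)) : Decidable (Spec_get_window crick peak up_distance down_distance keys out) := by unfold Spec_get_window; infer_instance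

-- ===== CLAIM (what is proved, stated in full; the proofs are below) =====
def Claim_equal_get_window : Prop := ∀ (crick : List (String × Int × Int × Int)) (peak : String × Int × Int × Int) (up_distance : Int) (down_distance : Int) (keys : Option (List Int)), Dom_get_window crick peak up_distance down_distance keys → Pre_get_window crick peak up_distance down_distance keys → Spec_get_window crick peak up_distance down_distance keys (get_window crick peak up_distance down_distance keys)

-- ===== LEMMAS AND PROOFS =====

-- On a sorted key list, bisect_left x is the number of keys < x.
theorem pv_bisectLeft_eq_countP (ks : List Int) (x : Int)
    (h : List.Pairwise (fun a b => a ≤ b) ks) :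
    PySem.List.bisectLeft ks x = ks.countP (fun k => decide (k < x)) := by
  obtain ⟨hle, hlt, hge⟩ := PySem.List.bisectLeft_spec ks x h
  set i := PySem.List.bisectLeft ks x with hi
  have hsplit : ks = ks.take i ++ ks.drop i := (List.take_append_drop i ks).symm
  have h1 : (ks.take i).countP (fun k => decide (k < x)) = (ks.take i).length := by
    apply List.countP_eq_length.mpr
    intro a ha
    obtain ⟨j, hj, rfl⟩ := List.getElem_of_mem ha
    have hjlen : j < ks.length := lt_of_lt_of_le (lt_of_lt_of_le hj (by simp)) (le_refl _)
    have hjlt : j < i := lt_of_lt_of_le hj (by simp)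
    simpa using hlt j hjlen hjlt
  have h2 : (ks.drop i).countP (fun k => decide (k < x)) = 0 := by
    apply List.countP_eq_zero.mpr
    intro a ha
    obtain ⟨j, hj, rfl⟩ := List.getElem_of_mem ha
    rw [List.getElem_drop]
    have hjlen : i + j < ks.length := by simpa [Nat.lt_sub_iff_add_lt'] using hj
    have := hge (i + j) hjlen (Nat.le_add_right _ _)
    simp; omega
  calc i = (ks.take i).length := by simp [Nat.min_eq_left hle]
    _ = (ks.take i).countP (fun k => decide (k < x)) + 0 := by omega
    _ = ks.countP (fun k => decide (k < x)) := by
        rw [← h2, ← List.countP_append, ← hsplit]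

-- On a sorted key list, bisect_right x is the number of keys ≤ x.
theorem pv_bisectRight_eq_countP (ks : List Int) (x : Int)
    (h : List.Pairwise (fun a b => a ≤ b) ks) :
    PySem.List.bisectRight ks x = ks.countP (fun k => decide (k ≤ x)) := by
  obtain ⟨hle, hlt, hge⟩ := PySem.List.bisectRight_spec ks x h
  set i := PySem.List.bisectRight ks x with hi
  have hsplit : ks = ks.take i ++ ks.drop i := (List.take_append_drop i ks).symm
  have h1 : (ks.take i).countP (fun k => decide (k ≤ x)) = (ks.take i).length := by
    apply List.countP_eq_length.mpr
    intro a ha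
    obtain ⟨j, hj, rfl⟩ := List.getElem_of_mem ha
    have hjlen : j < ks.length := lt_of_lt_of_le (lt_of_lt_of_le hj (by simp)) (le_refl _)
    have hjlt : j < i := lt_of_lt_of_le hj (by simp)
    simpa using hlt j hjlen hjlt
  have h2 : (ks.drop i).countP (fun k => decide (k ≤ x)) = 0 := by
    apply List.countP_eq_zero.mpr
    intro a ha
    obtain ⟨j, hj, rfl⟩ := List.getElem_of_mem ha
    rw [List.getElem_drop]
    have hjlen : i + j < ks.length := by simpa [Nat.lt_sub_iff_add_lt'] using hj
    have := hge (i + j) hjlen (Nat.le_add_right _ _)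
    simp; omega
  calc i = (ks.take i).length := by simp [Nat.min_eq_left hle]
    _ = (ks.take i).countP (fun k => decide (k ≤ x)) + 0 := by omega
    _ = ks.countP (fun k => decide (k ≤ x)) := by
        rw [← h2, ← List.countP_append, ← hsplit]

-- Core: on sorted keys, the [countP (< lo), countP (≤ hi)) slice of any parallel list
-- equals the zip-and-filter selection.  (No length relation between ks and cs is needed.)
theorem pv_window_eq (lo hi : Int) (ks : List Int) (cs : List (String × Int × Int × Int))
    (h : List.Pairwise (fun a b => a ≤ b) ks) :
    List.take (ks.countP (fun k => decide (k ≤ hi)) - ks.countP (fun k => decide (k < lo)))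
      (List.drop (ks.countP (fun k => decide (k < lo))) cs)
    = ((ks.zip cs).filter (fun kc => decide (lo ≤ kc.1) && decide (kc.1 ≤ hi))).map Prod.snd := by
  induction ks generalizing cs with
  | nil => simp
  | cons k t ih =>
    rw [List.pairwise_cons] at h
    obtain ⟨hk, ht⟩ := h
    cases cs with
    | nil => simp
    | cons c cs' =>
      by_cases h1 : k < lo
      · have h2 : ¬ lo ≤ k := by omega
        have e1 : List.countP (fun k => decide (k < lo)) (k :: t)
            = List.countP (fun k => decide (k < lo)) t + 1 := by
          simp [h1]
        have e3 : (((k, c) :: t.zip cs').filter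
              (fun kc => decide (lo ≤ kc.1) && decide (kc.1 ≤ hi)))
            = (t.zip cs').filter (fun kc => decide (lo ≤ kc.1) && decide (kc.1 ≤ hi)) := by
          simp [h2]
        by_cases h3 : k ≤ hi
        · have e2 : List.countP (fun k => decide (k ≤ hi)) (k :: t)
              = List.countP (fun k => decide (k ≤ hi)) t + 1 := by
            simp [h3]
          rw [List.zip_cons_cons, e1, e2, e3, Nat.add_sub_add_right, List.drop_succ_cons]
          exact ih cs' ht
        · -- hi < k, hence hi < every key: both windows are empty
          have hz : t.countP (fun x => decide (x ≤ hi)) = 0 := by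
            apply List.countP_eq_zero.mpr
            intro a ha
            have := hk a ha
            simp; omega
          have e2 : List.countP (fun k => decide (k ≤ hi)) (k :: t) = 0 := by
            simp [h3, hz]
          rw [List.zip_cons_cons, e1, e2, e3]
          have ihz := ih cs' ht
          rw [hz] at ihz
          simp only [Nat.zero_sub, List.take_zero] at ihz ⊢
          exact ihz
      · have hlo : lo ≤ k := by omega
        have hzl : t.countP (fun x => decide (x < lo)) = 0 := by
          apply List.countP_eq_zero.mpr
          intro a ha
          have := hk a ha
          simp; omega
        have e1 : List.countP (fun k => decide (k < lo)) (k :: t) = 0 := by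
          simp [h1, hzl]
        by_cases h3 : k ≤ hi
        · have e2 : List.countP (fun k => decide (k ≤ hi)) (k :: t)
              = List.countP (fun k => decide (k ≤ hi)) t + 1 := by
            simp [h3]
          have e3 : (((k, c) :: t.zip cs').filter
                (fun kc => decide (lo ≤ kc.1) && decide (kc.1 ≤ hi)))
              = (k, c) :: (t.zip cs').filter (fun kc => decide (lo ≤ kc.1) && decide (kc.1 ≤ hi)) := by
            simp [hlo, h3]
          rw [List.zip_cons_cons, e1, e2, e3, Nat.sub_zero, List.drop_zero,
            List.take_succ_cons, List.map_cons]
          have ihz := ih cs' ht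
          rw [hzl] at ihz
          simp only [Nat.sub_zero, List.drop_zero] at ihz
          rw [ihz]
        · have hz : t.countP (fun x => decide (x ≤ hi)) = 0 := by
            apply List.countP_eq_zero.mpr
            intro a ha
            have := hk a ha
            simp; omega
          have e2 : List.countP (fun k => decide (k ≤ hi)) (k :: t) = 0 := by
            simp [h3, hz]
          have e3 : (((k, c) :: t.zip cs').filter
                (fun kc => decide (lo ≤ kc.1) && decide (kc.1 ≤ hi)))
              = (t.zip cs').filter (fun kc => decide (lo ≤ kc.1) && decide (kc.1 ≤ hi)) := by
            simp [h3]
          rw [List.zip_cons_cons, e1, e2, e3]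
          have ihz := ih cs' ht
          rw [hzl, hz] at ihz
          simp only [Nat.sub_zero, List.take_zero, List.drop_zero] at ihz ⊢
          exact ihz

-- A's bisect slice on any key list K equals B's zip-and-filter pass, given K sorted.
theorem pv_ports_eq_of (crick : List (String × Int × Int × Int)) (K : List Int) (lo hi : Int)
    (hK : List.Pairwise (fun a b => a ≤ b) K) :
    PySem.List.slice crick (some ((PySem.List.bisectLeft K lo : Nat) : Int))
        (some ((PySem.List.bisectRight K hi : Nat) : Int))
    = ((K.zip crick).filter (fun kc => decide (lo ≤ kc.1) && decide (kc.1 ≤ hi))).map Prod.snd := by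
  rw [pv_bisectLeft_eq_countP _ _ hK, pv_bisectRight_eq_countP _ _ hK, PySem.List.slice_natCast]
  exact pv_window_eq _ _ _ _ hK

-- ===== VERDICT (by name: the statement is the Claim_ definition above) =====
theorem get_window_spec : Claim_equal_get_window := by
  intro crick peak up_distance down_distance keys _hdom hpre
  unfold Spec_get_window get_window get_window_alt
  unfold Pre_get_window pvEffKeys at hpre
  cases keys with
  | none =>
      simp only [Option.getD_none, List.length_nil, List.isEmpty_nil, if_true,
        make_keys] at hpre ⊢
      exact pv_ports_eq_of crick _ _ _ hpre
  | some ks =>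
      cases ks with
      | nil =>
          simp only [Option.getD_some, List.length_nil, List.isEmpty_nil, if_true,
            make_keys] at hpre ⊢
          exact pv_ports_eq_of crick _ _ _ hpre
      | cons k t =>
          have hne : k :: t ≠ ([] : List Int) := by simp
          simp only [Option.getD_some, List.length_cons, List.isEmpty_cons, make_keys] at hpre ⊢
          rw [if_neg (by omega)] at hpre
          rw [if_neg (by simp), if_neg hne]
          exact pv_ports_eq_of crick _ _ _ hpre
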